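-- pv_equiv track=rewrite | github.com/jk-jung/problem-solving | codewars/6kyu/6_More Zeros than Ones.py | more_zeros
-- ===== SOURCE A (Python) =====
-- def more_zeros(s):
--     ck = set()
--     def f(x):
--         ck.add(x)
--         x = ord(x)
--         a, b = 0, 0
--         while x:
--             if x % 2: a += 1
--             else: b += 1
--             x //= 2
--         return a < b
--     return [x for x in s if x not in ck and f(x)]
-- ===== SOURCE B (Python) =====
-- def more_zeros(s):
--     def go(chars):
--         if not chars:
--             return []
--         x = chars[0]
--         rest = [c for c in chars[1:] if c != x]
--         ones = bin(ord(x)).count('1')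
--         head = [x] if 2 * ones < ord(x).bit_length() else []
--         return head + go(rest)
--     return go(list(s))
-- ===== Notes on version B (the rewrite author's own statement) =====
-- stated objective: alternative
-- what changed: Replaces A's single forward pass with a seen-set and a bit-by-bit while-loop helper by a recursion that emits the first character (using a closed-form popcount vs bit_length test) and strips all its remaining occurrences from the rest before recursing, so no seen-set exists at all.
import Mathlib
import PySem

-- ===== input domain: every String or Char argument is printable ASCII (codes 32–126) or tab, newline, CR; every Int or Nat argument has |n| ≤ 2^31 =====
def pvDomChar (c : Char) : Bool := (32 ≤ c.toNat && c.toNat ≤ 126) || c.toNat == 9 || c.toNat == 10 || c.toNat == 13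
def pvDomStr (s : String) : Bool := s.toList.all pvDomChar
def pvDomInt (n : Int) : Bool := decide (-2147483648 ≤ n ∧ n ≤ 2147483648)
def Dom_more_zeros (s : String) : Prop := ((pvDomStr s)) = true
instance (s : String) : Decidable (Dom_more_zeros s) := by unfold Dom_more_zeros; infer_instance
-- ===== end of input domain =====

-- B replaces A's single seen-set pass (with a bit-by-bit while-loop helper) by a recursion that
-- emits the first character and strips its remaining occurrences before recursing, with a
-- closed-form popcount/bit_length predicate (alternative decomposition; same results).

-- ===== PORT A =====
-- A's while-loop: a counts odd bits, b counts even bits, x //= 2 each step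
def pvA_loop (x a b : Nat) : Nat × Nat :=
  if x = 0 then (a, b)
  else if x % 2 = 1 then pvA_loop (x / 2) (a + 1) b
  else pvA_loop (x / 2) a (b + 1)
decreasing_by all_goals exact Nat.div_lt_self (Nat.pos_of_ne_zero (by assumption)) (by omega)

-- A's helper f, minus its ck.add side effect (threaded explicitly in the fold)
def pvA_f (x : Char) : Bool :=
  let p := pvA_loop x.toNat 0 0
  decide (p.1 < p.2)

def more_zeros (s : String) : List String :=
  (s.toList.foldl
    (fun (st : PySem.Set Char × List String) x =>
      if PySem.Set.contains st.1 x then st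
      else (PySem.Set.add st.1 x,
            if pvA_f x then st.2 ++ [String.ofList [x]] else st.2))
    (PySem.Set.empty, [])).2

-- ===== PORT B =====
-- bin(ord(x)).count('1')
def pvB_popcount (n : Nat) : Nat :=
  if n = 0 then 0 else n % 2 + pvB_popcount (n / 2)
decreasing_by exact Nat.div_lt_self (Nat.pos_of_ne_zero (by assumption)) (by omega)

-- n.bit_length()
def pvB_bitlen (n : Nat) : Nat :=
  if n = 0 then 0 else pvB_bitlen (n / 2) + 1
decreasing_by exact Nat.div_lt_self (Nat.pos_of_ne_zero (by assumption)) (by omega)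

-- B's recursion: emit the head (if it qualifies), drop its other occurrences, recurse
def pvB_go : List Char → List String
  | [] => []
  | x :: xs =>
    (if 2 * pvB_popcount x.toNat < pvB_bitlen x.toNat then [String.ofList [x]] else [])
      ++ pvB_go (xs.filter (fun c => c != x))
termination_by l => l.length
decreasing_by
  simp only [List.unattach_filter, List.unattach_attach]
  exact Nat.lt_succ_of_le (List.length_filter_le _ _)

def more_zeros_alt (s : String) : List String :=
  pvB_go s.toList

-- ===== PRECONDITION & SPEC =====
def Spec_more_zeros (s : String) (out : List String) : Prop := out = more_zeros_alt s
instance (s : String) (out : List String) : Decidable (Spec_more_zeros s out) := by unfold Spec_more_zeros; infer_instance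

-- ===== CLAIM (what is proved, stated in full; the proofs are below) =====
def Claim_equal_more_zeros : Prop := ∀ (s : String), Dom_more_zeros s → Spec_more_zeros s (more_zeros s)

-- ===== LEMMAS AND PROOFS =====

theorem pvB_popcount_le_bitlen (n : Nat) : pvB_popcount n ≤ pvB_bitlen n := by
  induction n using Nat.strong_induction_on with
  | _ n ih =>
    rw [pvB_popcount, pvB_bitlen]
    by_cases h : n = 0
    · simp [h]
    · simp only [h, if_false]
      have := ih (n / 2) (Nat.div_lt_self (Nat.pos_of_ne_zero h) (by omega))
      omega

theorem pvA_loop_eq (n : Nat) : ∀ a b, pvA_loop n a b =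
    (a + pvB_popcount n, b + (pvB_bitlen n - pvB_popcount n)) := by
  induction n using Nat.strong_induction_on with
  | _ n ih =>
    intro a b
    rw [pvA_loop, pvB_popcount, pvB_bitlen]
    by_cases h : n = 0
    · simp [h]
    · have hlt := Nat.div_lt_self (Nat.pos_of_ne_zero h) (show 1 < 2 by omega)
      have hle := pvB_popcount_le_bitlen (n / 2)
      by_cases h2 : n % 2 = 1
      · simp only [h, if_false, h2, if_true, ih (n / 2) hlt, Prod.mk.injEq]
        omega
      · simp only [h, if_false, h2, if_false, ih (n / 2) hlt, Prod.mk.injEq]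
        have : n % 2 = 0 := by omega
        omega

theorem pred_eq (x : Char) :
    pvA_f x = decide (2 * pvB_popcount x.toNat < pvB_bitlen x.toNat) := by
  have hle := pvB_popcount_le_bitlen x.toNat
  simp only [pvA_f, pvA_loop_eq]
  by_cases h : 2 * pvB_popcount x.toNat < pvB_bitlen x.toNat <;>
    simp [h] <;> omega

theorem contains_eq (s : PySem.Set Char) (c : Char) :
    PySem.Set.contains s c = decide (c ∈ s) := by
  by_cases h : c ∈ s <;> simp [PySem.Set.contains, h]

theorem contains_add (s : PySem.Set Char) (x c : Char) :
    PySem.Set.contains (PySem.Set.add s x) c = (PySem.Set.contains s c || c == x) := by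
  rw [contains_eq, contains_eq]
  by_cases hcx : c = x <;> by_cases hcs : c ∈ s <;>
    simp [PySem.Set.mem_add, hcx, hcs]

theorem fold_eq_go (xs : List Char) : ∀ (seen : PySem.Set Char) res,
    (xs.foldl
      (fun (st : PySem.Set Char × List String) x =>
        if PySem.Set.contains st.1 x then st
        else (PySem.Set.add st.1 x,
              if pvA_f x then st.2 ++ [String.ofList [x]] else st.2))
      (seen, res)).2
    = res ++ pvB_go (xs.filter (fun c => !(PySem.Set.contains seen c))) := by
  induction xs with
  | nil => intro seen res; simp [pvB_go]
  | cons x xs ih =>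
    intro seen res
    rw [List.foldl_cons]
    by_cases h : PySem.Set.contains seen x = true
    · rw [if_pos h, ih, List.filter_cons]
      rw [contains_eq] at h
      simp [of_decide_eq_true h]
    · have hx : x ∉ seen := by rw [contains_eq] at h; simpa using h
      have hb : (!PySem.Set.contains seen x) = true := by simp [hx]
      rw [if_neg h, ih, List.filter_cons, if_pos hb, pvB_go]
      have hfilter :
          xs.filter (fun c => !(PySem.Set.contains (PySem.Set.add seen x) c))
            = (xs.filter (fun c => !(PySem.Set.contains seen c))).filter (fun c => c != x) := by
        rw [List.filter_filter]
        apply List.filter_congr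
        intro c _
        rw [contains_add]
        cases hcx : (c == x) <;> cases hcs : PySem.Set.contains seen c <;> simp_all
      rw [hfilter, List.filter_filter, pred_eq x]
      by_cases hp : 2 * pvB_popcount x.toNat < pvB_bitlen x.toNat
      · simp only [hp, decide_true, if_true, List.append_assoc,
          List.cons_append, List.nil_append]
      · simp only [hp, decide_false, if_false, Bool.false_eq_true, List.nil_append]

-- ===== VERDICT (by name: the statement is the Claim_ definition above) =====
theorem more_zeros_spec : Claim_equal_more_zeros := by
  intro s _
  show more_zeros s = more_zeros_alt s
  have h := fold_eq_go s.toList PySem.Set.empty []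
  simp only [more_zeros, more_zeros_alt, h, List.nil_append]
  have : s.toList.filter (fun c => !(PySem.Set.contains PySem.Set.empty c)) = s.toList := by
    apply List.filter_eq_self.mpr
    intro c _
    simp [PySem.Set.empty]
  rw [this]
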